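-- pv_equiv track=rewrite | github.com/Xinglab/scCirRL-seq | scCirRL/collect_candidate_bc.py | get_cumulative_cnt
-- ===== SOURCE A (Python) =====
-- _max_cand_bc_for_knee_calling=50000
--
-- def get_cumulative_cnt(cnt, max_n=_max_cand_bc_for_knee_calling, min_cnt=2):
--     cumu_cnt = []
--     cumu = 0
--     n = 0
--     for c in cnt:
--         if c < min_cnt:
--             break
--         if n >= max_n:
--             break
--         cumu_cnt.append(c+cumu)
--         n += 1
--         cumu += c
--     return cumu_cnt
-- ===== SOURCE B (Python) =====
-- _max_cand_bc_for_knee_calling = 50000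
--
-- def get_cumulative_cnt(cnt, max_n=_max_cand_bc_for_knee_calling, min_cnt=2):
--     # Count how many leading elements qualify, grab that prefix, take its grand
--     # total once, then peel the totals off BACKWARDS by subtraction.
--     k = 0
--     for c in cnt:
--         if c < min_cnt or k >= max_n:
--             break
--         k += 1
--     prefix = cnt[:k]
--     total = sum(prefix)
--     out = []
--     for c in reversed(prefix):
--         out.append(total)
--         total -= c
--     out.reverse()
--     return out
-- ===== Notes on version B (the rewrite author's own statement) =====
-- stated objective: alternative
-- what changed: Instead of accumulating running sums front-to-back, B counts the qualifying prefix, sums it once, and then derives each cumulative value backwards by subtracting elements from the grand total, building the output in reverse.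
import Mathlib
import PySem

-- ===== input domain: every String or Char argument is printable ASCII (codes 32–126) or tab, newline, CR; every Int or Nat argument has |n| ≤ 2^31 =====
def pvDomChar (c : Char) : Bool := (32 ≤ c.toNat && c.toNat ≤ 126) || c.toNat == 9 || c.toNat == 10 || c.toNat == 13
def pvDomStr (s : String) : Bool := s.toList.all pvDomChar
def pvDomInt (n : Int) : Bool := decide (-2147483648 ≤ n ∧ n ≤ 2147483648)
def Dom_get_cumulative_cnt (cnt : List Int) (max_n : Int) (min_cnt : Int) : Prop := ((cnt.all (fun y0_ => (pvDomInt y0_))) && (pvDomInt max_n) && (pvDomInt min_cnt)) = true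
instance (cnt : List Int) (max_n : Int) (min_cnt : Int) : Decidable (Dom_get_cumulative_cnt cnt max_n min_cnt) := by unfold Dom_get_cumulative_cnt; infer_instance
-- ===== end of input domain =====

-- B replaces A's front-to-back running-sum accumulator with: count the qualifying
-- prefix, sum it once, then derive the cumulative values backwards by subtraction
-- (alternative decomposition, same O(n) cost); proved to return the same list.

-- ===== PORT A =====
-- loop over cnt carrying (cumu, n), exactly as A does
def pvLoopA (max_n : Int) (min_cnt : Int) : List Int → Int → Int → List Int
  | [], _, _ => []
  | c :: rest, cumu, n =>
    if c < min_cnt then []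
    else if n ≥ max_n then []
    else (c + cumu) :: pvLoopA max_n min_cnt rest (cumu + c) (n + 1)

def get_cumulative_cnt (cnt : List Int) (max_n : Int) (min_cnt : Int) : List Int :=
  pvLoopA max_n min_cnt cnt 0 0

-- ===== PORT B =====
-- first loop of B: count the qualifying prefix (break on c < min_cnt or k >= max_n)
def pvCountK (max_n : Int) (min_cnt : Int) : List Int → Int → Int
  | [], k => k
  | c :: rest, k =>
    if c < min_cnt ∨ k ≥ max_n then k else pvCountK max_n min_cnt rest (k + 1)

-- second loop of B: walk the reversed prefix, emitting the running total and
-- subtracting each element from it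
def pvBack : List Int → Int → List Int
  | [], _ => []
  | c :: rest, total => total :: pvBack rest (total - c)

def get_cumulative_cnt_alt (cnt : List Int) (max_n : Int) (min_cnt : Int) : List Int :=
  let k := pvCountK max_n min_cnt cnt 0
  let pref := PySem.List.slice cnt none (some k)  -- cnt[:k]
  let total := pref.sum                            -- sum(prefix)
  (pvBack pref.reverse total).reverse              -- backward loop, then out.reverse()

-- ===== PRECONDITION & SPEC =====
def Spec_get_cumulative_cnt (cnt : List Int) (max_n : Int) (min_cnt : Int) (out : List Int) : Prop := out = get_cumulative_cnt_alt cnt max_n min_cnt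
instance (cnt : List Int) (max_n : Int) (min_cnt : Int) (out : List Int) : Decidable (Spec_get_cumulative_cnt cnt max_n min_cnt out) := by unfold Spec_get_cumulative_cnt; infer_instance

-- ===== CLAIM =====
def Claim_equal_get_cumulative_cnt : Prop := ∀ (cnt : List Int) (max_n : Int) (min_cnt : Int), Dom_get_cumulative_cnt cnt max_n min_cnt → Spec_get_cumulative_cnt cnt max_n min_cnt (get_cumulative_cnt cnt max_n min_cnt)

-- ===== LEMMAS AND PROOFS =====

-- reference form both sides reduce to: running sums of the capped qualifying prefix
def pvIsliceRef (k : Int) : List Int → List Int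
  | [] => []
  | c :: rest => if k ≤ 0 then [] else c :: pvIsliceRef (k - 1) rest

def pvAccRef (s : Int) : List Int → List Int
  | [] => []
  | c :: rest => (s + c) :: pvAccRef (s + c) rest

@[simp] lemma pvAccRef_nil (s : Int) : pvAccRef s [] = [] := rfl
@[simp] lemma pvAccRef_cons (s c : Int) (rest : List Int) :
    pvAccRef s (c :: rest) = (s + c) :: pvAccRef (s + c) rest := rfl

lemma pvLoopA_eq (max_n min_cnt : Int) (cnt : List Int) (cumu n : Int) :
    pvLoopA max_n min_cnt cnt cumu n =
      pvAccRef cumu (pvIsliceRef (max_n - n) (cnt.takeWhile (fun c => min_cnt ≤ c))) := by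
  induction cnt generalizing cumu n with
  | nil => simp [pvLoopA, pvIsliceRef]
  | cons c rest ih =>
    by_cases h1 : c < min_cnt
    · cases hI : pvIsliceRef (max_n - n) (List.takeWhile (fun c => decide (min_cnt ≤ c)) (c :: rest)) with
      | nil => simp [pvLoopA, h1]
      | cons y ys =>
        exfalso
        rw [List.takeWhile_cons_of_neg (by simpa using h1)] at hI
        simp [pvIsliceRef] at hI
    · by_cases h2 : n ≥ max_n
      · have hk : max_n - n ≤ 0 := by omega
        have hc : min_cnt ≤ c := not_lt.mp h1
        rw [List.takeWhile_cons_of_pos (by simpa using hc)]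
        simp [pvLoopA, h1, h2, pvIsliceRef, hk]
      · have hc : min_cnt ≤ c := not_lt.mp h1
        have hk : ¬ max_n - n ≤ 0 := by omega
        simp only [pvLoopA, if_neg h1, if_neg h2]
        rw [List.takeWhile_cons_of_pos (by simpa using hc)]
        show _ = pvAccRef cumu (pvIsliceRef (max_n - n) (c :: _))
        rw [pvIsliceRef, if_neg hk, pvAccRef_cons, ih (cumu + c) (n + 1)]
        have : max_n - n - 1 = max_n - (n + 1) := by ring
        rw [this]
        ring_nf

lemma pvCountK_ge (max_n min_cnt : Int) (cnt : List Int) (n : Int) :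
    n ≤ pvCountK max_n min_cnt cnt n := by
  induction cnt generalizing n with
  | nil => simp [pvCountK]
  | cons c rest ih =>
    by_cases h : c < min_cnt ∨ n ≥ max_n
    · simp [pvCountK, h]
    · simp only [pvCountK, if_neg h]
      have := ih (n + 1)
      omega

lemma pvCountK_take (max_n min_cnt : Int) (cnt : List Int) (n : Int) :
    cnt.take (pvCountK max_n min_cnt cnt n - n).toNat =
      pvIsliceRef (max_n - n) (cnt.takeWhile (fun c => min_cnt ≤ c)) := by
  induction cnt generalizing n with
  | nil => simp [pvCountK, pvIsliceRef]
  | cons c rest ih =>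
    by_cases h1 : c < min_cnt
    · have : pvCountK max_n min_cnt (c :: rest) n = n := by simp [pvCountK, h1]
      rw [this, List.takeWhile_cons_of_neg (by simpa using h1)]
      simp [pvIsliceRef]
    · have hc : min_cnt ≤ c := not_lt.mp h1
      rw [List.takeWhile_cons_of_pos (by simpa using hc)]
      by_cases h2 : n ≥ max_n
      · have : pvCountK max_n min_cnt (c :: rest) n = n := by simp [pvCountK, h1, h2]
        rw [this]
        have hk : max_n - n ≤ 0 := by omega
        simp [pvIsliceRef, hk]
      · have hstep : pvCountK max_n min_cnt (c :: rest) n = pvCountK max_n min_cnt rest (n + 1) := by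
          simp [pvCountK, h1, h2]
        rw [hstep]
        have hge := pvCountK_ge max_n min_cnt rest (n + 1)
        have hk : ¬ max_n - n ≤ 0 := by omega
        have htn : (pvCountK max_n min_cnt rest (n + 1) - n).toNat
            = (pvCountK max_n min_cnt rest (n + 1) - (n + 1)).toNat + 1 := by omega
        rw [htn, List.take_succ_cons, ih (n + 1)]
        show _ = pvIsliceRef (max_n - n) (c :: _)
        rw [pvIsliceRef, if_neg hk]
        have : max_n - n - 1 = max_n - (n + 1) := by ring
        rw [this]

lemma pvAccRef_append_singleton (s c : Int) (xs : List Int) :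
    pvAccRef s (xs ++ [c]) = pvAccRef s xs ++ [s + xs.sum + c] := by
  induction xs generalizing s with
  | nil => simp
  | cons x rest ih =>
    simp only [List.cons_append, pvAccRef_cons, ih, List.sum_cons]
    ring_nf

lemma pvBack_eq (q : List Int) (t : Int) :
    pvBack q t = (pvAccRef (t - q.sum) q.reverse).reverse := by
  induction q generalizing t with
  | nil => simp [pvBack]
  | cons c rest ih =>
    simp only [pvBack, List.reverse_cons, List.sum_cons]
    rw [pvAccRef_append_singleton, ih (t - c)]
    simp only [List.reverse_append, List.reverse_cons, List.reverse_nil, List.nil_append,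
      List.sum_reverse]
    have h1 : t - (c + rest.sum) + rest.sum + c = t := by ring
    have h2 : t - (c + rest.sum) = t - c - rest.sum := by ring
    rw [h1, h2]
    rfl

lemma alt_eq_ref (cnt : List Int) (max_n min_cnt : Int) :
    get_cumulative_cnt_alt cnt max_n min_cnt =
      pvAccRef 0 (pvIsliceRef max_n (cnt.takeWhile (fun c => min_cnt ≤ c))) := by
  unfold get_cumulative_cnt_alt
  show (pvBack (PySem.List.slice cnt none (some (pvCountK max_n min_cnt cnt 0))).reverse
      (PySem.List.slice cnt none (some (pvCountK max_n min_cnt cnt 0))).sum).reverse = _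
  have hk0 : (0:Int) ≤ pvCountK max_n min_cnt cnt 0 := pvCountK_ge max_n min_cnt cnt 0
  rw [PySem.List.slice_to _ hk0]
  have hT : cnt.take (pvCountK max_n min_cnt cnt 0).toNat =
      pvIsliceRef max_n (cnt.takeWhile (fun c => min_cnt ≤ c)) := by
    have := pvCountK_take max_n min_cnt cnt 0
    simpa using this
  rw [hT, pvBack_eq]
  simp [List.sum_reverse]

-- ===== VERDICT =====
theorem get_cumulative_cnt_spec : Claim_equal_get_cumulative_cnt := by
  intro cnt max_n min_cnt _
  unfold Spec_get_cumulative_cnt get_cumulative_cnt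
  rw [alt_eq_ref, pvLoopA_eq]
  norm_num
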